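-- pv_equiv track=rewrite | github.com/code-shoily/aoc_py | year_2018/day_2.py | has_two_or_three_times
-- ===== SOURCE A (Python) =====
-- from collections import Counter
-- from typing import Tuple, List, Optional
--
-- def has_two_or_three_times(line: str) -> Tuple[bool, bool]:
--     """
--
--     :param line:
--     :return:
--
--     ababab contains three a and three b, but it only counts once.
--
--     >>> has_two_or_three_times('abcdef')
--     (False, False)
--
--     >>> has_two_or_three_times('bababc')
--     (True, True)
--
--     >>> has_two_or_three_times('abbcde')
--     (True, False)
--
--     >>> has_two_or_three_times('abcccd')
--     (False, True)
--
--     >>> has_two_or_three_times('aabcdd')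
--     (True, False)
--
--     >>> has_two_or_three_times('abcdee')
--     (True, False)
--
--     >>> has_two_or_three_times('ababab')
--     (False, True)
--
--     """
--     has_two = False
--     has_three = False
--
--     for _, v in Counter(line).items():
--         if v == 2:
--             has_two = True
--         if v == 3:
--             has_three = True
--
--     return has_two, has_three
-- ===== SOURCE B (Python) =====
-- def has_two_or_three_times(line):
--     s = sorted(line)
--     has_two = False
--     has_three = False
--     i = 0
--     n = len(s)
--     while i < n:
--         j = i + 1
--         while j < n and s[j] == s[i]:
--             j += 1
--         run = j - i
--         if run == 2:
--             has_two = True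
--         elif run == 3:
--             has_three = True
--         i = j
--     return has_two, has_three
-- ===== Notes on version B (the rewrite author's own statement) =====
-- stated objective: alternative
-- what changed: Replaces the Counter hash-table pass with sort-then-scan: sort the characters and walk consecutive equal-character runs, setting has_two/has_three from each run length.
import Mathlib
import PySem

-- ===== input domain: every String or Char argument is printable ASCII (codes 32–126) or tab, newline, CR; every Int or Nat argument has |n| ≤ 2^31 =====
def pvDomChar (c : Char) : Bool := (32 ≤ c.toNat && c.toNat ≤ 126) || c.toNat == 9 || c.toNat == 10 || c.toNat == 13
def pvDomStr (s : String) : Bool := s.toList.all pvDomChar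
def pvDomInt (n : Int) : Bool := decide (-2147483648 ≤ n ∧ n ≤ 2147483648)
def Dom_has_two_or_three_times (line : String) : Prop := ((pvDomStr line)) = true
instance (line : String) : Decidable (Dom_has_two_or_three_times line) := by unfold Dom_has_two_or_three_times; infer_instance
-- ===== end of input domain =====

-- B replaces A's Counter hash-table pass with sort-then-scan over equal-character runs (alternative algorithm, same results).


-- ===== PORT A =====
-- for _, v in Counter(line).items(): if v == 2: has_two = True; if v == 3: has_three = True
def has_two_or_three_times (line : String) : Bool × Bool :=
  (PySem.Dict.counter line.toList).items.foldl
    (fun st kv =>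
      let has_two := if kv.2 = 2 then true else st.1
      let has_three := if kv.2 = 3 then true else st.2
      (has_two, has_three))
    (false, false)

-- ===== PORT B =====
-- the outer while loop of Source B: each step consumes one run of equal characters
-- (the inner 'while s[j] == s[i]: j += 1' is the takeWhile/dropWhile split of the rest)
def pvRunScan : List Char → Bool → Bool → Bool × Bool
  | [], has_two, has_three => (has_two, has_three)
  | c :: rest, has_two, has_three =>
    let run := 1 + (rest.takeWhile (fun d => d == c)).length
    let rest' := rest.dropWhile (fun d => d == c)
    if run = 2 then pvRunScan rest' true has_three
    else if run = 3 then pvRunScan rest' has_two true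
    else pvRunScan rest' has_two has_three
  termination_by l => l.length
  decreasing_by
    all_goals
      simpa using Nat.lt_succ_of_le (List.length_dropWhile_le (fun d => d == c) rest)

def has_two_or_three_times_alt (line : String) : Bool × Bool :=
  pvRunScan (PySem.List.sorted line.toList (fun c => c) false) false false

-- ===== PRECONDITION & SPEC =====
def Spec_has_two_or_three_times (line : String) (out : Bool × Bool) : Prop := out = has_two_or_three_times_alt line
instance (line : String) (out : Bool × Bool) : Decidable (Spec_has_two_or_three_times line out) := by unfold Spec_has_two_or_three_times; infer_instance

-- ===== CLAIM (what is proved, stated in full; the proofs are below) =====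
def Claim_equal_has_two_or_three_times : Prop := ∀ (line : String), Dom_has_two_or_three_times line → Spec_has_two_or_three_times line (has_two_or_three_times line)

-- ===== LEMMAS AND PROOFS =====

-- both ports reduce to this: "some character occurs exactly 2 / exactly 3 times"
def pvTgt (l : List Char) : Bool × Bool :=
  (l.any (fun c => l.count c == 2), l.any (fun c => l.count c == 3))

lemma foldA (ps : List (Char × Int)) (b2 b3 : Bool) :
    ps.foldl (fun st kv =>
      let has_two := if kv.2 = 2 then true else st.1
      let has_three := if kv.2 = 3 then true else st.2
      (has_two, has_three)) (b2, b3)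
    = (b2 || ps.any (fun kv => kv.2 == 2), b3 || ps.any (fun kv => kv.2 == 3)) := by
  induction ps generalizing b2 b3 with
  | nil => simp
  | cons kv t ih =>
    simp only [List.foldl_cons, List.any_cons, ih, Prod.mk.injEq]
    constructor
    · by_cases hc2 : kv.2 = 2
      · simp [hc2]
      · simp [hc2, beq_eq_false_iff_ne.mpr hc2]
    · by_cases hc3 : kv.2 = 3
      · simp [hc3]
      · simp [hc3, beq_eq_false_iff_ne.mpr hc3]

lemma portA_eq_tgt (line : String) : has_two_or_three_times line = pvTgt line.toList := by
  unfold has_two_or_three_times pvTgt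
  rw [PySem.Dict.items_counter, foldA]
  simp only [List.any_map, Function.comp_def, Bool.false_or]
  simp only [Prod.mk.injEq]
  constructor <;>
  · rw [Bool.eq_iff_iff]
    simp only [List.any_eq_true, PySem.Set.mem_ofList, beq_iff_eq]
    constructor <;> (rintro ⟨x, hx, hc⟩; exact ⟨x, hx, by omega⟩)

-- any' over a count-predicate, split at the head run of a sorted list
lemma any_count_split (c : Char) (rest tk dr : List Char)
    (htk : ∀ e ∈ tk, e = c) (hdr : ∀ e ∈ dr, e ≠ c)
    (hsplit : rest = tk ++ dr)
    (hcnt : ∀ x ∈ dr, (c :: rest).count x = dr.count x) (m : Nat) :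
    (c :: rest).any (fun x => (c :: rest).count x == m)
      = (((c :: rest).count c == m) || dr.any (fun x => dr.count x == m)) := by
  rw [Bool.eq_iff_iff]
  simp only [Bool.or_eq_true, List.any_eq_true, beq_iff_eq]
  constructor
  · rintro ⟨x, hx, hc⟩
    rcases List.mem_cons.mp hx with rfl | hx'
    · exact Or.inl hc
    · rw [hsplit] at hx'
      rcases List.mem_append.mp hx' with h1 | h2
      · exact Or.inl (htk x h1 ▸ hc)
      · exact Or.inr ⟨x, h2, by rw [← hcnt x h2]; exact hc⟩
  · rintro (hc | ⟨x, hx, hc⟩)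
    · exact ⟨c, List.mem_cons_self .., hc⟩
    · exact ⟨x, List.mem_cons_of_mem _ (hsplit ▸ List.mem_append_right _ hx), by rw [hcnt x hx]; exact hc⟩

lemma runScan_eq : ∀ (n : Nat) (s : List Char), s.length = n → s.Pairwise (· ≤ ·) → ∀ (b2 b3 : Bool),
    pvRunScan s b2 b3
      = (b2 || s.any (fun c => s.count c == 2), b3 || s.any (fun c => s.count c == 3)) := by
  intro n
  induction n using Nat.strong_induction_on with
  | _ n ih =>
    intro s hn h b2 b3
    cases s with
    | nil => simp [pvRunScan]
    | cons c rest =>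
      obtain ⟨tk, htkdef⟩ : ∃ tk, tk = rest.takeWhile (fun d => d == c) := ⟨_, rfl⟩
      obtain ⟨dr, hdrdef⟩ : ∃ dr, dr = rest.dropWhile (fun d => d == c) := ⟨_, rfl⟩
      have hsplit : rest = tk ++ dr := by
        rw [htkdef, hdrdef, List.takeWhile_append_dropWhile]
      obtain ⟨hhead, hrest⟩ := List.pairwise_cons.mp h
      have htk : ∀ e ∈ tk, e = c := by
        intro e he
        rw [htkdef] at he
        simpa using List.mem_takeWhile_imp he
      have hdr_gt : ∀ e ∈ dr, c < e := by
        intro e he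
        cases hdre : rest.dropWhile (fun d => d == c) with
        | nil => rw [hdrdef, hdre] at he; simp at he
        | cons d u =>
          have hdne : d ≠ c := by
            have hne : rest.dropWhile (fun d => d == c) ≠ [] := by rw [hdre]; simp
            have := List.head_dropWhile_not (fun d' => d' == c) hne
            simp [hdre] at this
            exact this
          have hdrest : d ∈ rest := by
            rw [hsplit, hdrdef, hdre]
            exact List.mem_append_right _ (List.mem_cons_self ..)
          have hcd : c < d := lt_of_le_of_ne (hhead d hdrest) (Ne.symm hdne)
          rw [hdrdef, hdre] at he
          rcases List.mem_cons.mp he with rfl | hu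
          · exact hcd
          · have hsub : (d :: u).Sublist rest := by
              rw [← hdre]; exact List.dropWhile_sublist _
            have hpw : (d :: u).Pairwise (· ≤ ·) := hrest.sublist hsub
            exact lt_of_lt_of_le hcd ((List.pairwise_cons.mp hpw).1 e hu)
      have hdr_ne : ∀ e ∈ dr, e ≠ c := fun e he => ne_of_gt (hdr_gt e he)
      have hc_notin : c ∉ dr := fun hc => (hdr_ne c hc) rfl
      have hcount_tk : tk.count c = tk.length :=
        List.count_eq_length.mpr (fun b hb => (htk b hb).symm)
      have hcount_c : (c :: rest).count c = 1 + tk.length := by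
        rw [List.count_cons_self, hsplit, List.count_append, hcount_tk,
            List.count_eq_zero.mpr hc_notin]
        omega
      have hcnt : ∀ x ∈ dr, (c :: rest).count x = dr.count x := by
        intro x hx
        have hxc : x ≠ c := hdr_ne x hx
        have htk0 : tk.count x = 0 := List.count_eq_zero.mpr (fun hmem => hxc (htk x hmem))
        rw [List.count_cons_of_ne (Ne.symm hxc), hsplit, List.count_append, htk0]
        omega
      have hdr_pw : dr.Pairwise (· ≤ ·) := by
        rw [hdrdef]; exact hrest.sublist (List.dropWhile_sublist _)
      have hlt : dr.length < n := by
        have h1 : dr.length ≤ rest.length := by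
          rw [hdrdef]; exact List.length_dropWhile_le _ _
        have h2 : (c :: rest).length = rest.length + 1 := rfl
        omega
      have ihdr := ih dr.length hlt dr rfl hdr_pw
      have hany := any_count_split c rest tk dr htk hdr_ne hsplit hcnt
      rw [pvRunScan]
      simp only [← htkdef, ← hdrdef]
      have hrun2 : (1 + tk.length = 2) ↔ ((c :: rest).count c == 2) = true := by
        rw [hcount_c]; simp
      have hrun3 : (1 + tk.length = 3) ↔ ((c :: rest).count c == 3) = true := by
        rw [hcount_c]; simp
      split_ifs with h2 h3
      · have h3' : ((c :: rest).count c == 3) = false := by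
          rw [hcount_c]; simp; omega
        rw [ihdr, hany 2, hany 3, hrun2.mp h2, h3']
        simp
      · have h2' : ((c :: rest).count c == 2) = false := by
          rw [hcount_c]; simp; omega
        rw [ihdr, hany 2, hany 3, hrun3.mp h3, h2']
        simp
      · have h2' : ((c :: rest).count c == 2) = false := by
          rw [hcount_c]; simp; omega
        have h3' : ((c :: rest).count c == 3) = false := by
          rw [hcount_c]; simp; omega
        rw [ihdr, hany 2, hany 3, h2', h3']
        simp

lemma tgt_perm (s l : List Char) (h : s.Perm l) : pvTgt s = pvTgt l := by
  unfold pvTgt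
  have key : ∀ m : Nat, s.any (fun c => s.count c == m) = l.any (fun c => l.count c == m) := by
    intro m
    rw [Bool.eq_iff_iff]
    simp only [List.any_eq_true]
    constructor
    · rintro ⟨x, hx, hc⟩
      exact ⟨x, h.mem_iff.mp hx, by rw [← h.count_eq]; exact hc⟩
    · rintro ⟨x, hx, hc⟩
      exact ⟨x, h.mem_iff.mpr hx, by rw [h.count_eq]; exact hc⟩
  rw [key 2, key 3]

lemma portB_eq_tgt (line : String) : has_two_or_three_times_alt line = pvTgt line.toList := by
  unfold has_two_or_three_times_alt
  have hpw : (PySem.List.sorted line.toList (fun c => c) false).Pairwise (· ≤ ·) :=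
    PySem.List.sorted_pairwise line.toList (fun c => c)
  rw [runScan_eq _ _ rfl hpw]
  have := tgt_perm _ _ (PySem.List.sorted_perm line.toList (fun c : Char => c) false)
  unfold pvTgt at this
  simp only [Bool.false_or]
  rw [Prod.mk.injEq] at this ⊢
  exact this

-- ===== VERDICT (by name: the statement is the Claim_ definition above) =====
theorem has_two_or_three_times_spec : Claim_equal_has_two_or_three_times := by
  intro line _
  unfold Spec_has_two_or_three_times
  rw [portA_eq_tgt, portB_eq_tgt]
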